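-- pv_equiv track=rewrite | github.com/CodingThrust/problem-reductions | docs/paper/verify-reductions/verify_partition_production_planning.py | build_target_config
-- ===== SOURCE A (Python) =====
-- def build_target_config(sizes, I1):
--     """
--     Build a feasible production plan from a partition subset.
--     x_i = a_i if i in I1, else 0, for element periods.
--     x_{n} = 0 for the demand period.
--     """
--     n = len(sizes)
--     config = []
--     for i in range(n):
--         if i in I1:
--             config.append(sizes[i])
--         else:
--             config.append(0)
--     config.append(0)  # demand period: no production
--     return config
-- ===== SOURCE B (Python) =====
-- def build_target_config(sizes, I1):
--     """
--     Build a feasible production plan from a partition subset.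
--     Scatter form: start from an all-zero plan of length n+1 (element periods
--     plus the demand period) and overwrite the selected element periods.
--     """
--     n = len(sizes)
--     config = [0] * (n + 1)
--     for i in I1:
--         if 0 <= i < n:
--             config[i] = sizes[i]
--     return config
-- ===== Notes on version B (the rewrite author's own statement) =====
-- stated objective: idiomatic
-- what changed: B preallocates an all-zero plan of length n+1 and scatters sizes[i] at each selected in-range index of I1, instead of A's per-position scan over range(n) with an 'i in I1' membership test.
import Mathlib
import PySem

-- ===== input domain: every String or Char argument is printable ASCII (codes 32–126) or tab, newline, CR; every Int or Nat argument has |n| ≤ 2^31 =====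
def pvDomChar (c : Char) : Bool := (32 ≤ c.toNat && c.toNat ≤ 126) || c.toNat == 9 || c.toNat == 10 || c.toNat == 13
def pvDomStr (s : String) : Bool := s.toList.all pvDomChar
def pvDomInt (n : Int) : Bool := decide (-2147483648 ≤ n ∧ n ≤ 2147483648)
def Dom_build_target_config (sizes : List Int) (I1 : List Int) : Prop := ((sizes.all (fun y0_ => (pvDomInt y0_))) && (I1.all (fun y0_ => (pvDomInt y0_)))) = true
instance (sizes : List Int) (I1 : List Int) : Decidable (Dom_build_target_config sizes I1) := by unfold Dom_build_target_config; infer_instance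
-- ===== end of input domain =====

-- B replaces A's per-position scan with membership test by an all-zero plan of
-- length n+1 scattered with sizes[i] at each in-range selected index (idiomatic).

-- ===== PORT A =====
-- literal port: for i in range(n): append sizes[i] if i in I1 else 0; then append 0
def build_target_config (sizes : List Int) (I1 : List Int) : List Int :=
  let n : Int := sizes.length
  let config : List Int :=
    (PySem.List.pyRange 0 n 1).foldl
      (fun config i =>
        if i ∈ I1 then config ++ [PySem.List.pyGetD sizes i 0]  -- sizes[i]; i ∈ range(n) so in range
        else config ++ [0]) []
  config ++ [0]

-- ===== PORT B =====
-- literal port of Source B: config = [0]*(n+1); for i in I1: if 0 <= i < n: config[i] = sizes[i]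
def build_target_config_alt (sizes : List Int) (I1 : List Int) : List Int :=
  let n : Int := sizes.length
  I1.foldl
    (fun config i =>
      if 0 ≤ i ∧ i < n then PySem.List.pySetD config i (PySem.List.pyGetD sizes i 0)
      else config)
    (List.replicate (n + 1).toNat 0)

-- ===== PRECONDITION & SPEC =====
def Spec_build_target_config (sizes : List Int) (I1 : List Int) (out : List Int) : Prop := out = build_target_config_alt sizes I1
instance (sizes : List Int) (I1 : List Int) (out : List Int) : Decidable (Spec_build_target_config sizes I1 out) := by unfold Spec_build_target_config; infer_instance

-- ===== CLAIM (what is proved, stated in full; the proofs are below) =====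
def Claim_equal_build_target_config : Prop := ∀ (sizes : List Int) (I1 : List Int), Dom_build_target_config sizes I1 → Spec_build_target_config sizes I1 (build_target_config sizes I1)

-- ===== LEMMAS AND PROOFS =====

-- A's loop: appending one element per index is init ++ map
theorem foldA_eq_map (I1 : List Int) (f : Int → Int) :
    ∀ (l : List Int) (init : List Int),
      l.foldl (fun c i => if i ∈ I1 then c ++ [f i] else c ++ [0]) init
        = init ++ l.map (fun i => if i ∈ I1 then f i else 0) := by
  intro l
  induction l with
  | nil => intro init; simp
  | cons x xs ih =>
    intro init
    by_cases hx : x ∈ I1 <;> simp [List.foldl, hx, ih]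

-- A's result, characterised
theorem build_target_config_eq (sizes : List Int) (I1 : List Int) :
    build_target_config sizes I1
      = (List.range sizes.length).map
          (fun (k : Nat) => if (k : Int) ∈ I1 then sizes.getD k 0 else 0) ++ [0] := by
  show (PySem.List.pyRange 0 (sizes.length : Int) 1).foldl
      (fun config i => if i ∈ I1 then config ++ [PySem.List.pyGetD sizes i 0]
        else config ++ [0]) [] ++ [0] = _
  rw [foldA_eq_map I1 (fun i => PySem.List.pyGetD sizes i 0)]
  simp [PySem.List.pyRange_one, List.map_map, Function.comp_def]

-- B's loop step
def stepB (sizes : List Int) : List Int → Int → List Int :=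
  fun config i =>
    if 0 ≤ i ∧ i < (sizes.length : Int) then
      PySem.List.pySetD config i (PySem.List.pyGetD sizes i 0)
    else config

theorem length_stepB (sizes : List Int) (st : List Int) (x : Int) :
    (stepB sizes st x).length = st.length := by
  unfold stepB
  split
  · next h => rw [PySem.List.pySetD_of_nonneg st _ h.1]; simp
  · rfl

-- value at index j after the scatter fold
theorem foldB_getElem? (sizes : List Int) :
    ∀ (I1 : List Int) (st : List Int), sizes.length ≤ st.length → ∀ (j : Nat),
      (I1.foldl (stepB sizes) st)[j]?
        = if (j : Int) ∈ I1 ∧ j < sizes.length then some (sizes.getD j 0) else st[j]? := by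
  intro I1
  induction I1 with
  | nil => intro st _ j; simp
  | cons x xs ih =>
    intro st hlen j
    have hlen' : sizes.length ≤ (stepB sizes st x).length := by rw [length_stepB]; exact hlen
    rw [List.foldl_cons, ih (stepB sizes st x) hlen' j]
    by_cases hjx : (j : Int) ∈ xs ∧ j < sizes.length
    · simp [hjx]
    · have hstep : (stepB sizes st x)[j]?
          = if x = (j : Int) ∧ j < sizes.length then some (sizes.getD j 0) else st[j]? := by
        unfold stepB
        by_cases hx : 0 ≤ x ∧ x < (sizes.length : Int)
        · rw [if_pos hx, PySem.List.pySetD_of_nonneg st _ hx.1, List.getElem?_set]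
          by_cases hxe : x = (j : Int)
          · have ht : x.toNat = j := by omega
            have hj : j < sizes.length := by omega
            have hjs : j < st.length := by omega
            simp [hxe, hj, hjs]
          · have ht : x.toNat ≠ j := by omega
            simp [ht, hxe]
        · rw [if_neg hx]
          have : ¬ (x = (j : Int) ∧ j < sizes.length) := by
            rintro ⟨rfl, hj⟩; exact hx ⟨by omega, by omega⟩
          simp [this]
      rw [hstep]
      by_cases hj : j < sizes.length
      · by_cases hxe : x = (j : Int)
        · simp [hxe, hj]
        · have hnx : (j : Int) ∉ xs := fun h => hjx ⟨h, hj⟩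
          have hne : ¬ (j : Int) = x := fun h => hxe h.symm
          simp [hnx, hne, hxe, hj]
      · simp [hj]

theorem main_eq (sizes : List Int) (I1 : List Int) :
    build_target_config sizes I1 = build_target_config_alt sizes I1 := by
  rw [build_target_config_eq]
  show _ = I1.foldl (stepB sizes) (List.replicate ((sizes.length : Int) + 1).toNat 0)
  apply List.ext_getElem?
  intro j
  have hnat : ((sizes.length : Int) + 1).toNat = sizes.length + 1 := by omega
  have hlen : sizes.length ≤ (List.replicate ((sizes.length : Int) + 1).toNat (0 : Int)).length := by
    simp [hnat]
  rw [foldB_getElem? sizes I1 _ hlen j]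
  by_cases hj : j < sizes.length
  · rw [List.getElem?_append_left (by simpa using hj)]
    by_cases hm : (j : Int) ∈ I1
    · simp [hm, hj]
    · simp [hm, hj, Nat.lt_succ_of_lt hj]
  · by_cases hj1 : j = sizes.length
    · subst hj1
      rw [List.getElem?_append_right (by simp)]
      simp [hnat]
    · have h1 : ¬ ((j : Int) ∈ I1 ∧ j < sizes.length) := by tauto
      have h2 : ¬ j < sizes.length + 1 := by omega
      rw [List.getElem?_append_right (by simpa using hj)]
      simp [hnat, h2, hj]
      omega

-- ===== VERDICT (by name: the statement is the Claim_ definition above) =====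
theorem build_target_config_spec : Claim_equal_build_target_config := by
  intro sizes I1 _
  unfold Spec_build_target_config
  exact main_eq sizes I1
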